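-- pv_equiv track=rewrite | github.com/schef/farmfest_2025 | lilypond_transformer.py | append_to_header
-- ===== SOURCE A (Python) =====
-- def append_to_header(lines: list, variable: str, text: str):
--     in_header = False
--     for line_index in range(len(lines)):
--         line = lines[line_index]
--         if in_header:
--             if line == '}\n':
--                 in_header = False
--             else:
--                 if variable in line:
--                     parts = line.split(" ")
--                     parts[-1] = f"{parts[-1][:-2]} {text}{parts[-1][-2:]}"
--                     line = " ".join(parts)
--         else:
--             if line == '\\header {\n':
--                 in_header = True
--         lines[line_index] = line
--     return lines
-- ===== SOURCE B (Python) =====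
-- def append_to_header(lines: list, variable: str, text: str):
--     # Recursive split-at-marker decomposition: locate markers with list.index,
--     # cut the list with slices, edit a whole block with a comprehension, recurse
--     # on the tail after the closing brace.  No per-line scanning loop or flag.
--     def _edit(line):
--         if variable in line:
--             parts = line.split(" ")
--             parts[-1] = f"{parts[-1][:-2]} {text}{parts[-1][-2:]}"
--             line = " ".join(parts)
--         return line
--
--     def _go(seg):
--         try:
--             o = seg.index('\\header {\n')
--         except ValueError:
--             return seg
--         rest = seg[o + 1:]
--         try:
--             c = rest.index('}\n')
--         except ValueError:
--             return seg[:o + 1] + [_edit(l) for l in rest]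
--         return (seg[:o + 1] + [_edit(l) for l in rest[:c]] + ['}\n']
--                 + _go(rest[c + 1:]))
--
--     lines[:] = _go(lines)
--     return lines
-- ===== Notes on version B (the rewrite author's own statement) =====
-- stated objective: alternative
-- what changed: Replaced A's single indexed pass with an in_header boolean flag by a recursive split-at-marker algorithm: list.index locates each '\header {\n' opener and its first '}\n' closer, slicing cuts the list into before/block/after, a comprehension edits the whole block at once, and recursion handles the tail after the closer.
import Mathlib
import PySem

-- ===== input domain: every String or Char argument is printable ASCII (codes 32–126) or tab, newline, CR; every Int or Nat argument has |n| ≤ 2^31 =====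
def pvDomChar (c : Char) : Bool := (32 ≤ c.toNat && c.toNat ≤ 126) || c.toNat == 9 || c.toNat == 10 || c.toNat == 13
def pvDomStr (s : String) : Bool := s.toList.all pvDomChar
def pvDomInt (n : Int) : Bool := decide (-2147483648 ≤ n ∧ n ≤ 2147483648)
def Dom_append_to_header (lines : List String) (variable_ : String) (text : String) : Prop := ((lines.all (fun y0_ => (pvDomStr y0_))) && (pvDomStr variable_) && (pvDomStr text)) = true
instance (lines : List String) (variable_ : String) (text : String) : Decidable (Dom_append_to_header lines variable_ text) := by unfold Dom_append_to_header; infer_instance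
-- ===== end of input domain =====

-- B replaces A's flag state machine by a recursive split-at-marker algorithm
-- (index?/slices/map/recursion); same return value (both Pythons also mutate
-- `lines` in place with the same final contents; equivalence is about the value).


-- ===== PORT A =====
-- the token edit A applies to a line containing `variable` inside a header block:
-- parts = line.split(" "); parts[-1] = f"{parts[-1][:-2]} {text}{parts[-1][-2:]}"; " ".join(parts)
def pvEditA (variable_ text line : String) : String :=
  if PySem.Str.isIn variable_ line then
    let parts := (PySem.Str.split? line " ").getD []
    let last := (PySem.List.pyGet? parts (-1)).getD ""
    let newLast := PySem.Str.slice last none (some (-2)) ++ " " ++ text ++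
      PySem.Str.slice last (some (-2)) none
    PySem.Str.join " " (parts.dropLast ++ [newLast])
  else line

-- A's single pass over the lines, carrying the in_header flag
def pvLoopA (variable_ text : String) (inHeader : Bool) : List String → List String
  | [] => []
  | line :: rest =>
    if inHeader then
      if line == "}\n" then line :: pvLoopA variable_ text false rest
      else pvEditA variable_ text line :: pvLoopA variable_ text true rest
    else
      if line == "\\header {\n" then line :: pvLoopA variable_ text true rest
      else line :: pvLoopA variable_ text false rest

def append_to_header (lines : List String) (variable_ : String) (text : String) : List String :=
  pvLoopA variable_ text false lines

-- ===== PORT B =====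
-- the identical token edit (Source B's _edit)
def pvEditB (variable_ text line : String) : String :=
  if PySem.Str.isIn variable_ line then
    let parts := (PySem.Str.split? line " ").getD []
    let last := (PySem.List.pyGet? parts (-1)).getD ""
    let newLast := PySem.Str.slice last none (some (-2)) ++ " " ++ text ++
      PySem.Str.slice last (some (-2)) none
    PySem.Str.join " " (parts.dropLast ++ [newLast])
  else line

-- Source B's _go: index? finds the markers, slices cut the list, map edits a block,
-- recursion continues after the closing '}\n'
def pvGoB (variable_ text : String) (seg : List String) : List String :=
  match ho : PySem.List.index? seg "\\header {\n" with
  | none => seg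
  | some o =>
    -- rest = seg[o+1:]  (Source B binds it; written out at each use here)
    match PySem.List.index? (PySem.List.slice seg (some ((o : Int) + 1)) none) "}\n" with
    | none => PySem.List.slice seg none (some ((o : Int) + 1)) ++
        (PySem.List.slice seg (some ((o : Int) + 1)) none).map (pvEditB variable_ text)
    | some c =>
      PySem.List.slice seg none (some ((o : Int) + 1)) ++
        (PySem.List.slice (PySem.List.slice seg (some ((o : Int) + 1)) none) none (some (c : Int))).map (pvEditB variable_ text) ++
        ["}\n"] ++ pvGoB variable_ text (PySem.List.slice (PySem.List.slice seg (some ((o : Int) + 1)) none) (some ((c : Int) + 1)) none)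
termination_by seg.length
decreasing_by
  have h := PySem.List.getElem_of_index?_eq_some ho
  obtain ⟨hk, -, -⟩ := h
  have e1 : ((o : Int) + 1) = (((o + 1 : Nat)) : Int) := by push_cast; ring
  have e2 : ((c : Int) + 1) = (((c + 1 : Nat)) : Int) := by push_cast; ring
  rw [e2, PySem.List.slice_from_natCast, e1, PySem.List.slice_from_natCast]
  simp only [List.length_drop]
  omega

def append_to_header_alt (lines : List String) (variable_ : String) (text : String) : List String :=
  pvGoB variable_ text lines

-- ===== PRECONDITION & SPEC =====
def Spec_append_to_header (lines : List String) (variable_ : String) (text : String) (out : List String) : Prop := out = append_to_header_alt lines variable_ text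
instance (lines : List String) (variable_ : String) (text : String) (out : List String) : Decidable (Spec_append_to_header lines variable_ text out) := by unfold Spec_append_to_header; infer_instance

-- ===== CLAIM =====
def Claim_equal_append_to_header : Prop := ∀ (lines : List String) (variable_ : String) (text : String), Dom_append_to_header lines variable_ text → Spec_append_to_header lines variable_ text (append_to_header lines variable_ text)

-- ===== LEMMAS AND PROOFS =====
theorem pvEditA_eq_pvEditB (variable_ text line : String) :
    pvEditA variable_ text line = pvEditB variable_ text line := rfl

-- flag=false over lines containing no opener is the identity
theorem pvLoopA_false_no_opener (variable_ text : String) (xs : List String)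
    (h : "\\header {\n" ∉ xs) : pvLoopA variable_ text false xs = xs := by
  induction xs with
  | nil => rfl
  | cons x rest ih =>
    simp only [List.mem_cons, not_or] at h
    have h1 : x ≠ _ := fun he => h.1 he.symm
    simp [pvLoopA, h1, ih h.2]

-- flag=true over lines containing no closer edits every line
theorem pvLoopA_true_no_closer (variable_ text : String) (xs : List String)
    (h : "}\n" ∉ xs) : pvLoopA variable_ text true xs = xs.map (pvEditA variable_ text) := by
  induction xs with
  | nil => rfl
  | cons x rest ih =>
    simp only [List.mem_cons, not_or] at h
    have h1 : x ≠ _ := fun he => h.1 he.symm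
    simp [pvLoopA, h1, ih h.2]

-- splitting flag=false at the first opener
theorem pvLoopA_false_split (variable_ text : String) (pre suf : List String)
    (h : "\\header {\n" ∉ pre) :
    pvLoopA variable_ text false (pre ++ "\\header {\n" :: suf) =
      pre ++ "\\header {\n" :: pvLoopA variable_ text true suf := by
  induction pre with
  | nil => simp [pvLoopA]
  | cons x rest ih =>
    simp only [List.mem_cons, not_or] at h
    have h1 : x ≠ _ := fun he => h.1 he.symm
    simp [pvLoopA, h1, ih h.2]

-- splitting flag=true at the first closer
theorem pvLoopA_true_split (variable_ text : String) (pre suf : List String)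
    (h : "}\n" ∉ pre) :
    pvLoopA variable_ text true (pre ++ "}\n" :: suf) =
      pre.map (pvEditA variable_ text) ++ "}\n" :: pvLoopA variable_ text false suf := by
  induction pre with
  | nil => simp [pvLoopA]
  | cons x rest ih =>
    simp only [List.mem_cons, not_or] at h
    have h1 : x ≠ _ := fun he => h.1 he.symm
    simp [pvLoopA, h1, ih h.2]

-- the main equivalence, by strong induction on the list length
theorem pvLoopA_eq_pvGoB (variable_ text : String) (seg : List String) :
    pvLoopA variable_ text false seg = pvGoB variable_ text seg := by
  generalize hn : seg.length = n
  induction n using Nat.strong_induction_on generalizing seg with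
  | _ n ih =>
  rw [pvGoB]
  split
  case h_1 ho =>
    exact pvLoopA_false_no_opener variable_ text seg ((PySem.List.index?_eq_none_iff _ _).mp ho)
  case h_2 o ho =>
    obtain ⟨pre, rest0, hseg, hlen, hnpre⟩ := (PySem.List.index?_eq_some_iff _ _ _).mp ho
    have e1 : ((o : Int) + 1) = (((o + 1 : Nat)) : Int) := by push_cast; ring
    have hrest : PySem.List.slice seg (some ((o : Int) + 1)) none = rest0 := by
      rw [e1, PySem.List.slice_from_natCast, hseg, ← hlen]
      simp [List.drop_append]
    have htake : PySem.List.slice seg none (some ((o : Int) + 1)) = pre ++ ["\\header {\n"] := by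
      rw [e1, PySem.List.slice_to_natCast, hseg, ← hlen]
      simp [List.take_append]
    split
    case h_1 hc =>
      rw [hrest] at hc
      have hnc : "}\n" ∉ rest0 := (PySem.List.index?_eq_none_iff _ _).mp hc
      rw [hrest, htake, hseg, pvLoopA_false_split variable_ text pre rest0 hnpre,
        pvLoopA_true_no_closer variable_ text rest0 hnc]
      simp [pvEditA_eq_pvEditB]
    case h_2 c hc =>
      rw [hrest] at hc
      obtain ⟨pre2, suf, hrest0, hlen2, hnpre2⟩ := (PySem.List.index?_eq_some_iff _ _ _).mp hc
      have e2 : ((c : Int) + 1) = (((c + 1 : Nat)) : Int) := by push_cast; ring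
      have hsuf : PySem.List.slice rest0 (some ((c : Int) + 1)) none = suf := by
        rw [e2, PySem.List.slice_from_natCast, hrest0, ← hlen2]
        simp [List.drop_append]
      have htake2 : PySem.List.slice rest0 none (some (c : Int)) = pre2 := by
        rw [PySem.List.slice_to_natCast, hrest0, ← hlen2]
        simp
      have hlt : suf.length < n := by
        rw [← hn, hseg, hrest0]; simp; omega
      rw [hrest, hsuf, htake2, htake, hseg, hrest0,
        pvLoopA_false_split variable_ text pre _ hnpre,
        pvLoopA_true_split variable_ text pre2 suf hnpre2,
        ih suf.length hlt suf rfl]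
      simp [pvEditA_eq_pvEditB]

-- ===== VERDICT =====
theorem append_to_header_spec : Claim_equal_append_to_header := by
  intro lines variable_ text _
  unfold Spec_append_to_header append_to_header append_to_header_alt
  exact pvLoopA_eq_pvGoB variable_ text lines
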